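-- pv_equiv track=rewrite | github.com/TheAlgorithms/Python | dynamic_programming/iterating_through_submasks.py | alt_maskelerin_listesi
-- ===== SOURCE A (Python) =====
-- def alt_maskelerin_listesi(mask: int) -> list[int]:
--     """
--     Argümanlar:
--         mask : maskeyi gösteren sayı (her zaman 0'dan büyük tamsayı, sıfırın
--             alt maskesi yoktur)
--
--     Dönüş:
--         tüm_alt_maskeler : maskenin alt maskelerinin listesi (s maskesi, yalnızca
--         orijinal maskede yer alan bitlerin ayarlanmış olması durumunda m maskesinin
--         alt maskesi olarak adlandırılır)
--
--     Hatalar: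
--         AssertionError: maske pozitif tamsayı değil
--
--     >>> alt_maskelerin_listesi(15)
--     [15, 14, 13, 12, 11, 10, 9, 8, 7, 6, 5, 4, 3, 2, 1]
--     >>> alt_maskelerin_listesi(13)
--     [13, 12, 9, 8, 5, 4, 1]
--     >>> alt_maskelerin_listesi(-7)  # doctest: +ELLIPSIS
--     Traceback (most recent call last):
--         ...
--     AssertionError: mas maske pozitif tamsayı olmalı, girdiniz -7
--     >>> alt_maskelerin_listesi(0)  # doctest: +ELLIPSIS
--     Traceback (most recent call last):
--         ...
--     AssertionError: mas maske pozitif tamsayı olmalı, girdiniz 0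
--
--     """
--
--     assert (
--         isinstance(mask, int) and mask > 0
--     ), f"maske pozitif tamsayı olmalı, girdiniz {mask}"
--
--     """
--     ilk alt maske maskenin kendisi olacaktır, ardından diğer alt maskeleri
--     elde etmek için işlem yapılacaktır, sıfıra ulaşana kadar (sıfır nihai
--     alt maskeler listesine dahil edilmez)
--     """
--     tüm_alt_maskeler = []
--     alt_maske = mask
--
--     while alt_maske:
--         tüm_alt_maskeler.append(alt_maske)
--         alt_maske = (alt_maske - 1) & mask
--
--     return tüm_alt_maskeler
-- ===== SOURCE B (Python) =====
-- def alt_maskelerin_listesi(mask: int) -> list[int]: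
--     assert (
--         isinstance(mask, int) and mask > 0
--     ), f"maske pozitif tamsayı olmalı, girdiniz {mask}"
--
--     # collect the bit values (1, 2, 4, ...) of the set bits of mask, ascending
--     positions = []
--     bit = 1
--     m = mask
--     while m:
--         if m & 1:
--             positions.append(bit)
--         bit <<= 1
--         m >>= 1
--
--     k = len(positions)
--     result = []
--     for i in range(2**k - 1, 0, -1):
--         sub = 0
--         j = i
--         for p in positions:
--             if j & 1:
--                 sub |= p
--             j >>= 1
--         result.append(sub)
--     return result
-- ===== Notes on version B (the rewrite author's own statement) =====
-- stated objective: alternative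
-- what changed: Replaces A's (s-1)&mask descent trick by first collecting the set-bit values of mask and then, for each index i from 2^k-1 down to 1, OR-ing together the bit values selected by the bits of i.
import Mathlib
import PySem

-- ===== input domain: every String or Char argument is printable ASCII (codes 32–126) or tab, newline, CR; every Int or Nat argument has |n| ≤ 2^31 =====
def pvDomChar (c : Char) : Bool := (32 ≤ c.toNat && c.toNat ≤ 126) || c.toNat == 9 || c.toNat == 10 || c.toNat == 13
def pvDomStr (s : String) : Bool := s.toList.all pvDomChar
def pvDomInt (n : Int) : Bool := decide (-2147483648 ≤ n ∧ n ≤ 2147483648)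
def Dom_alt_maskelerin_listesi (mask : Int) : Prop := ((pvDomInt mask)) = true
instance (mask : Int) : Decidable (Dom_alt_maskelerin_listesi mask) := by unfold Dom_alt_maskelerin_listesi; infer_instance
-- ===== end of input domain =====

-- B replaces A's (s-1)&mask trick by collecting the set-bit values of mask and, for each index
-- i = 2^k-1 .. 1 descending, OR-ing together the bit values selected by i's bits (alternative
-- decomposition, same cost class).

-- ===== PORT A =====
-- while alt_maske: append; alt_maske = (alt_maske - 1) & mask   (values stay ≥ 0, so Nat state)
def altLoopA (mask : Nat) (s : Nat) (acc : List Int) : List Int :=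
  if h : s = 0 then acc
  else altLoopA mask ((s - 1) &&& mask) (acc ++ [(s : Int)])
termination_by s
decreasing_by
  exact Nat.lt_of_le_of_lt Nat.and_le_left (Nat.sub_lt (Nat.pos_of_ne_zero h) Nat.one_pos)

def alt_maskelerin_listesi (mask : Int) : List Int :=
  if 0 < mask then altLoopA mask.toNat mask.toNat [] else []   -- assert fails (raises) when mask ≤ 0

-- ===== PORT B =====
-- positions: the bit values (1,2,4,…) of the set bits of m, ascending ('bit' doubles, 'm' halves)
def bitPos (m : Nat) (bit : Nat) : List Nat :=
  if h : m = 0 then []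
  else (if m % 2 = 1 then [bit] else []) ++ bitPos (m / 2) (2 * bit)
termination_by m
decreasing_by exact Nat.div_lt_self (Nat.pos_of_ne_zero h) Nat.one_lt_two

-- inner for-loop: for p in positions: if j & 1: sub |= p; j >>= 1
def bsub : List Nat → Nat → Nat → Nat
  | [], _, sub => sub
  | p :: ps, j, sub => bsub ps (j / 2) (if j % 2 = 1 then sub ||| p else sub)

-- outer for-loop over range(2^k - 1, 0, -1)
def bloop (ps : List Nat) : Nat → List Int → List Int
  | 0, acc => acc
  | i + 1, acc => bloop ps i (acc ++ [((bsub ps (i + 1) 0 : Nat) : Int)])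

def alt_maskelerin_listesi_alt (mask : Int) : List Int :=
  if 0 < mask then
    bloop (bitPos mask.toNat 1) (2 ^ (bitPos mask.toNat 1).length - 1) []
  else []   -- assert fails (raises) when mask ≤ 0

-- ===== PRECONDITION & SPEC =====
-- A's assert raises AssertionError unless mask > 0; exactly those inputs are excluded.
def Pre_alt_maskelerin_listesi (mask : Int) : Prop := 0 < mask
instance (mask : Int) : Decidable (Pre_alt_maskelerin_listesi mask) := by
  unfold Pre_alt_maskelerin_listesi; infer_instance

def pvWitness_alt_maskelerin_listesi : Int := 13

def Spec_alt_maskelerin_listesi (mask : Int) (out : List Int) : Prop := out = alt_maskelerin_listesi_alt mask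
instance (mask : Int) (out : List Int) : Decidable (Spec_alt_maskelerin_listesi mask out) := by
  unfold Spec_alt_maskelerin_listesi; infer_instance

-- ===== CLAIM (what is proved, stated in full; the proofs are below) =====
def Claim_equal_alt_maskelerin_listesi : Prop := ∀ (mask : Int), Dom_alt_maskelerin_listesi mask → Pre_alt_maskelerin_listesi mask → Spec_alt_maskelerin_listesi mask (alt_maskelerin_listesi mask)

-- ===== LEMMAS AND PROOFS =====

-- the common reference function: deposit the bits of i into the set-bit positions of m
def deposit (m i : Nat) : Nat :=
  if h : m = 0 then 0
  else if m % 2 = 1 then i % 2 + 2 * deposit (m / 2) (i / 2)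
  else 2 * deposit (m / 2) i
termination_by m
decreasing_by all_goals exact Nat.div_lt_self (Nat.pos_of_ne_zero h) Nat.one_lt_two

-- popcount
def pc (m : Nat) : Nat :=
  if h : m = 0 then 0 else m % 2 + pc (m / 2)
termination_by m
decreasing_by exact Nat.div_lt_self (Nat.pos_of_ne_zero h) Nat.one_lt_two

def descList : Nat → List Nat
  | 0 => []
  | i + 1 => (i + 1) :: descList i

lemma deposit_eq_odd (m i : Nat) (hm : m ≠ 0) (h : m % 2 = 1) :
    deposit m i = i % 2 + 2 * deposit (m / 2) (i / 2) := by
  rw [deposit, dif_neg hm, if_pos h]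

lemma deposit_eq_even (m i : Nat) (hm : m ≠ 0) (h : m % 2 = 0) :
    deposit m i = 2 * deposit (m / 2) i := by
  rw [deposit, dif_neg hm, if_neg (by omega)]

lemma pc_eq (m : Nat) (hm : m ≠ 0) : pc m = m % 2 + pc (m / 2) := by
  rw [pc, dif_neg hm]

lemma and_mod_two (x y : Nat) : (x &&& y) % 2 = x % 2 * (y % 2) := by
  have h := @Nat.and_mod_two_eq_one x y
  have hz := Nat.mod_two_eq_zero_or_one (x &&& y)
  rcases Nat.mod_two_eq_zero_or_one x with hx | hx <;>
    rcases Nat.mod_two_eq_zero_or_one y with hy | hy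
  · rw [hx, hy]; rcases hz with hz | hz; · simpa using hz
    · exact absurd (h.mp hz).1 (by omega)
  · rw [hx, hy]; rcases hz with hz | hz; · simpa using hz
    · exact absurd (h.mp hz).1 (by omega)
  · rw [hx, hy]; rcases hz with hz | hz; · simpa using hz
    · exact absurd (h.mp hz).2 (by omega)
  · rw [hx, hy, h.mpr ⟨hx, hy⟩]

lemma and_split (x y : Nat) : x &&& y = 2 * (x / 2 &&& y / 2) + x % 2 * (y % 2) := by
  conv_lhs => rw [← Nat.div_add_mod (x &&& y) 2]
  rw [Nat.and_div_two, and_mod_two]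

lemma or_pow_eq_add {t : Nat} {a : Nat} (h : a < 2 ^ t) : a ||| 2 ^ t = a + 2 ^ t := by
  have := (Nat.two_pow_add_eq_or_of_lt h 1).symm
  simpa [Nat.mul_one, Nat.or_comm, Nat.add_comm] using this

lemma deposit_zero (m : Nat) : deposit m 0 = 0 := by
  induction m using Nat.strong_induction_on with
  | _ m ih =>
    rw [deposit]
    split
    · rfl
    · rename_i hm
      have h := ih (m / 2) (Nat.div_lt_self (Nat.pos_of_ne_zero hm) Nat.one_lt_two)
      split <;> simp [h]

lemma deposit_and_self (m : Nat) : ∀ i, deposit m i &&& m = deposit m i := by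
  induction m using Nat.strong_induction_on with
  | _ m ih =>
    intro i
    by_cases hm : m = 0
    · subst hm; simp [deposit]
    have hdiv := Nat.div_lt_self (Nat.pos_of_ne_zero hm) Nat.one_lt_two
    rcases Nat.mod_two_eq_zero_or_one m with he | ho
    · rw [deposit_eq_even m i hm he, and_split]
      have e1 : 2 * deposit (m / 2) i / 2 = deposit (m / 2) i := by omega
      have e2 : 2 * deposit (m / 2) i % 2 = 0 := by omega
      rw [e1, e2, ih (m / 2) hdiv i]
      omega
    · rw [deposit_eq_odd m i hm ho, and_split]
      have e1 : (i % 2 + 2 * deposit (m / 2) (i / 2)) / 2 = deposit (m / 2) (i / 2) := by omega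
      have e2 : (i % 2 + 2 * deposit (m / 2) (i / 2)) % 2 = i % 2 := by omega
      rw [e1, e2, ih (m / 2) hdiv (i / 2), ho]
      omega

lemma deposit_ne_zero (m : Nat) : ∀ i, 1 ≤ i → i < 2 ^ pc m → deposit m i ≠ 0 := by
  induction m using Nat.strong_induction_on with
  | _ m ih =>
    intro i h1 h2
    by_cases hm : m = 0
    · subst hm; rw [pc] at h2; simp at h2; omega
    have hdiv := Nat.div_lt_self (Nat.pos_of_ne_zero hm) Nat.one_lt_two
    rcases Nat.mod_two_eq_zero_or_one m with he | ho
    · rw [pc_eq m hm, he] at h2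
      simp only [Nat.zero_add] at h2
      rw [deposit_eq_even m i hm he]
      have := ih (m / 2) hdiv i h1 h2
      omega
    · rw [pc_eq m hm, ho, pow_add, pow_one] at h2
      rw [deposit_eq_odd m i hm ho]
      rcases Nat.mod_two_eq_zero_or_one i with hie | hio
      · have ha : 1 ≤ i / 2 := by omega
        have hb : i / 2 < 2 ^ pc (m / 2) := by omega
        have := ih (m / 2) hdiv (i / 2) ha hb
        omega
      · omega

lemma deposit_step (m : Nat) : ∀ i, 1 ≤ i → i < 2 ^ pc m →
    (deposit m i - 1) &&& m = deposit m (i - 1) := by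
  induction m using Nat.strong_induction_on with
  | _ m ih =>
    intro i h1 h2
    by_cases hm : m = 0
    · subst hm; rw [pc] at h2; simp at h2; omega
    have hdiv := Nat.div_lt_self (Nat.pos_of_ne_zero hm) Nat.one_lt_two
    rcases Nat.mod_two_eq_zero_or_one m with he | ho
    · -- m even
      rw [pc_eq m hm, he] at h2
      simp only [Nat.zero_add] at h2
      have hd : deposit (m / 2) i ≠ 0 := deposit_ne_zero (m / 2) i h1 h2
      have hih := ih (m / 2) hdiv i h1 h2
      rw [deposit_eq_even m i hm he, and_split]
      have e1 : (2 * deposit (m / 2) i - 1) / 2 = deposit (m / 2) i - 1 := by omega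
      have e2 : (2 * deposit (m / 2) i - 1) % 2 = 1 := by omega
      rw [e1, e2, he, hih, deposit_eq_even m (i - 1) hm he]
      omega
    · -- m odd
      rw [pc_eq m hm, ho, pow_add, pow_one] at h2
      rcases Nat.mod_two_eq_zero_or_one i with hie | hio
      · -- i even (so i ≥ 2)
        have ha : 1 ≤ i / 2 := by omega
        have hb : i / 2 < 2 ^ pc (m / 2) := by omega
        have hd : deposit (m / 2) (i / 2) ≠ 0 := deposit_ne_zero (m / 2) (i / 2) ha hb
        have hih := ih (m / 2) hdiv (i / 2) ha hb
        rw [deposit_eq_odd m i hm ho, and_split]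
        have e1 : (i % 2 + 2 * deposit (m / 2) (i / 2) - 1) / 2 = deposit (m / 2) (i / 2) - 1 := by omega
        have e2 : (i % 2 + 2 * deposit (m / 2) (i / 2) - 1) % 2 = 1 := by omega
        rw [e1, e2, ho, hih, deposit_eq_odd m (i - 1) hm ho]
        have e3 : (i - 1) % 2 = 1 := by omega
        have e4 : (i - 1) / 2 = i / 2 - 1 := by omega
        rw [e3, e4]
        omega
      · -- i odd
        have hsub := deposit_and_self (m / 2) (i / 2)
        rw [deposit_eq_odd m i hm ho, and_split]
        have e1 : (i % 2 + 2 * deposit (m / 2) (i / 2) - 1) / 2 = deposit (m / 2) (i / 2) := by omega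
        have e2 : (i % 2 + 2 * deposit (m / 2) (i / 2) - 1) % 2 = 0 := by omega
        rw [e1, e2, hsub, deposit_eq_odd m (i - 1) hm ho]
        have e3 : (i - 1) % 2 = 0 := by omega
        have e4 : (i - 1) / 2 = i / 2 := by omega
        rw [e3, e4]
        omega

lemma deposit_top (m : Nat) : deposit m (2 ^ pc m - 1) = m := by
  induction m using Nat.strong_induction_on with
  | _ m ih =>
    by_cases hm : m = 0
    · subst hm; simp [deposit]
    have hdiv := Nat.div_lt_self (Nat.pos_of_ne_zero hm) Nat.one_lt_two
    have hih := ih (m / 2) hdiv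
    have hp : 1 ≤ 2 ^ pc (m / 2) := Nat.one_le_two_pow
    rcases Nat.mod_two_eq_zero_or_one m with he | ho
    · rw [pc_eq m hm, he]
      simp only [Nat.zero_add]
      rw [deposit_eq_even m _ hm he, hih]
      omega
    · rw [pc_eq m hm, ho, pow_add, pow_one]
      rw [deposit_eq_odd m _ hm ho]
      have e1 : (2 * 2 ^ pc (m / 2) - 1) % 2 = 1 := by omega
      have e2 : (2 * 2 ^ pc (m / 2) - 1) / 2 = 2 ^ pc (m / 2) - 1 := by omega
      rw [e1, e2, hih]
      omega

-- A's loop, anchored at deposit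
lemma altLoopA_chain (m : Nat) (i : Nat) (h2 : i < 2 ^ pc m) : ∀ acc : List Int,
    altLoopA m (deposit m i) acc = acc ++ (descList i).map (fun j => ((deposit m j : Nat) : Int)) := by
  induction i with
  | zero => intro acc; rw [deposit_zero, altLoopA]; simp [descList]
  | succ i ih =>
    intro acc
    have hne : deposit m (i + 1) ≠ 0 := deposit_ne_zero m (i + 1) (by omega) h2
    rw [altLoopA, dif_neg hne, deposit_step m (i + 1) (by omega) h2]
    simp only [Nat.add_sub_cancel]
    rw [ih (by omega)]
    simp [descList]

-- B's positions list
lemma bitPos_length (m : Nat) : ∀ b, (bitPos m b).length = pc m := by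
  induction m using Nat.strong_induction_on with
  | _ m ih =>
    intro b
    by_cases hm : m = 0
    · subst hm; simp [bitPos, pc]
    have hdiv := Nat.div_lt_self (Nat.pos_of_ne_zero hm) Nat.one_lt_two
    rw [bitPos, dif_neg hm, pc_eq m hm]
    rcases Nat.mod_two_eq_zero_or_one m with he | ho
    · simp [he, ih (m / 2) hdiv]
    · simp [ho, ih (m / 2) hdiv, Nat.add_comm]

lemma bsub_bitPos (m : Nat) : ∀ t j sub, sub < 2 ^ t →
    bsub (bitPos m (2 ^ t)) j sub = sub + 2 ^ t * deposit m j := by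
  induction m using Nat.strong_induction_on with
  | _ m ih =>
    intro t j sub hlt
    by_cases hm : m = 0
    · subst hm; simp [bitPos, bsub, deposit]
    have hdiv := Nat.div_lt_self (Nat.pos_of_ne_zero hm) Nat.one_lt_two
    have hpow : (2 : Nat) * 2 ^ t = 2 ^ (t + 1) := by rw [pow_succ]; ring
    rw [bitPos, dif_neg hm]
    rcases Nat.mod_two_eq_zero_or_one m with he | ho
    · rw [if_neg (by omega)]
      simp only [List.nil_append]
      rw [hpow, ih (m / 2) hdiv (t + 1) j sub (by rw [pow_succ]; omega)]
      rw [deposit_eq_even m j hm he, pow_succ]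
      ring
    · rw [if_pos ho]
      simp only [List.cons_append, List.nil_append, bsub]
      rcases Nat.mod_two_eq_zero_or_one j with hj | hj
      · rw [if_neg (by omega), hpow,
          ih (m / 2) hdiv (t + 1) (j / 2) sub (by rw [pow_succ]; omega)]
        rw [deposit_eq_odd m j hm ho, hj, pow_succ]
        ring
      · rw [if_pos hj, or_pow_eq_add hlt, hpow,
          ih (m / 2) hdiv (t + 1) (j / 2) (sub + 2 ^ t) (by rw [pow_succ]; omega)]
        rw [deposit_eq_odd m j hm ho, hj, pow_succ]
        ring

lemma bloop_chain (ps : List Nat) (i : Nat) : ∀ acc : List Int,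
    bloop ps i acc = acc ++ (descList i).map (fun j => ((bsub ps j 0 : Nat) : Int)) := by
  induction i with
  | zero => intro acc; simp [bloop, descList]
  | succ i ih => intro acc; rw [bloop, ih]; simp [descList]

-- ===== VERDICT (by name: the statement is the Claim_ definition above) =====
theorem alt_maskelerin_listesi_spec : Claim_equal_alt_maskelerin_listesi := by
  intro mask _ hpre
  unfold Pre_alt_maskelerin_listesi at hpre
  unfold Spec_alt_maskelerin_listesi alt_maskelerin_listesi alt_maskelerin_listesi_alt
  rw [if_pos hpre, if_pos hpre]
  set m := mask.toNat with hm
  have htop : deposit m (2 ^ pc m - 1) = m := deposit_top m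
  have hlt : 2 ^ pc m - 1 < 2 ^ pc m := by
    have : 1 ≤ 2 ^ pc m := Nat.one_le_two_pow
    omega
  calc altLoopA m m []
      = altLoopA m (deposit m (2 ^ pc m - 1)) [] := by rw [htop]
    _ = (descList (2 ^ pc m - 1)).map (fun j => ((deposit m j : Nat) : Int)) := by
        rw [altLoopA_chain m _ hlt]; simp
    _ = bloop (bitPos m 1) (2 ^ (bitPos m 1).length - 1) [] := by
        rw [bloop_chain, bitPos_length]
        simp only [List.nil_append]
        apply List.map_congr_left
        intro j _
        have h := bsub_bitPos m 0 j 0 (by norm_num)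
        simp only [pow_zero, Nat.one_mul, Nat.zero_add] at h
        rw [h]
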